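-- pv_equiv track=rewrite | github.com/zrchn/GraPy | server/core/cft/utils.py | remove_sublists
-- ===== SOURCE A (Python) =====
-- def remove_sublists(lists):
--     lists.sort(key=len, reverse=True)
--     n69wsp9oq8 = []
--     for current in lists:
--         can_keep = True
--         for existing in lists:
--             if not current == existing:
--                 if len(current) >= len(existing) and current[:len(existing)] == existing:
--                     can_keep = False
--                     break
--             elif current in n69wsp9oq8:
--                 can_keep = False
--                 break
--         if can_keep:
--             n69wsp9oq8.append(current)
--     return n69wsp9oq8
-- ===== SOURCE B (Python) =====
-- def remove_sublists(lists):
--     lists.sort(key=len, reverse=True)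
--     present = {tuple(l) for l in lists}
--     lengths = {len(l) for l in lists}
--     seen = set()
--     result = []
--     for cur in lists:
--         t = tuple(cur)
--         if t in seen:
--             continue
--         if any(k < len(t) and t[:k] in present for k in lengths):
--             continue
--         seen.add(t)
--         result.append(cur)
--     return result
-- ===== Notes on version B (the rewrite author's own statement) =====
-- stated objective: faster
-- what changed: A's quadratic all-lists inner scan per element is replaced by one hash set of all lists probed only at the prefix lengths that actually occur (a second small set), plus a seen-set for dedup instead of 'current in result' list scans.
import Mathlib
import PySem

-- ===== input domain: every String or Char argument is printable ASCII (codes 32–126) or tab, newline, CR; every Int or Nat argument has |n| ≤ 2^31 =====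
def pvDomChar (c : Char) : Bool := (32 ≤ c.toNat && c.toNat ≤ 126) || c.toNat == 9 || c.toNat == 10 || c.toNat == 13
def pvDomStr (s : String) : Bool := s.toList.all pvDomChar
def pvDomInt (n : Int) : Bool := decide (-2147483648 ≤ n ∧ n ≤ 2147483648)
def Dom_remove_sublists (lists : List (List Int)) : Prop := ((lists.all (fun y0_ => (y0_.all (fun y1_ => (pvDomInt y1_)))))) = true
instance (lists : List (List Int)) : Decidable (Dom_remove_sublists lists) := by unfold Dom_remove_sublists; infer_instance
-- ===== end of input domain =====

-- B replaces A's quadratic inner scan (for every list, scan all lists for a prefix) by one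
-- hash set of all lists, probed only at the proper-prefix lengths that occur in the input,
-- plus a seen-set for dedup (measured faster in a timing run).
-- Note: Python A sorts the argument in place; B performs the same in-place sort, and the
-- equivalence proved here is about the return value.

-- ===== PORT A =====
-- inner 'for existing in lists: … break' loop of A
def pvAInner (current : List Int) (acc : List (List Int)) : List (List Int) → Bool
  | [] => true
  | existing :: rest =>
    if !(current == existing) then
      if decide (PySem.List.len current ≥ PySem.List.len existing)
          && (PySem.List.slice current none (some (PySem.List.len existing)) == existing) then
        false
      else pvAInner current acc rest
    else if acc.contains current then false
    else pvAInner current acc rest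

def remove_sublists (lists : List (List Int)) : List (List Int) :=
  let sortedLists := PySem.List.sorted lists (fun l => PySem.List.len l) true
  sortedLists.foldl
    (fun acc current => if pvAInner current acc sortedLists then acc ++ [current] else acc) []

-- ===== PORT B =====
-- 'any(k < len(t) and t[:k] in present for k in lengths)' of B (an existence test,
-- so the hash-iteration order of the Python set 'lengths' cannot affect the result)
def pvBHasPrefix (t : List Int) (present : PySem.Set (List Int)) (lengths : PySem.Set Int) : Bool :=
  lengths.any
    (fun k => decide (k < PySem.List.len t)
      && PySem.Set.contains present (PySem.List.slice t none (some k)))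

def remove_sublists_alt (lists : List (List Int)) : List (List Int) :=
  let sortedLists := PySem.List.sorted lists (fun l => PySem.List.len l) true
  let present : PySem.Set (List Int) := PySem.Set.ofList sortedLists
  let lengths : PySem.Set Int := PySem.Set.ofList (sortedLists.map (fun l => PySem.List.len l))
  (sortedLists.foldl
    (fun (st : PySem.Set (List Int) × List (List Int)) (cur : List Int) =>
      if PySem.Set.contains st.1 cur then st
      else if pvBHasPrefix cur present lengths then st
      else (PySem.Set.add st.1 cur, st.2 ++ [cur]))
    (PySem.Set.empty, [])).2

-- ===== PRECONDITION & SPEC =====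
def Spec_remove_sublists (lists : List (List Int)) (out : List (List Int)) : Prop := out = remove_sublists_alt lists
instance (lists : List (List Int)) (out : List (List Int)) : Decidable (Spec_remove_sublists lists out) := by unfold Spec_remove_sublists; infer_instance

-- ===== CLAIM (what is proved, stated in full; the proofs are below) =====
def Claim_equal_remove_sublists : Prop := ∀ (lists : List (List Int)), Dom_remove_sublists lists → Spec_remove_sublists lists (remove_sublists lists)

-- ===== LEMMAS AND PROOFS =====

-- A's inner loop returns true iff no element of l triggers either break condition.
theorem pvAInner_iff (current : List Int) (acc l : List (List Int)) :
    pvAInner current acc l = true ↔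
      (¬ (current ∈ l ∧ current ∈ acc)) ∧
      ∀ e ∈ l, current ≠ e →
        ¬ (e.length ≤ current.length ∧ current.take e.length = e) := by
  induction l with
  | nil => simp [pvAInner]
  | cons existing rest ih =>
    have hB : (decide (PySem.List.len current ≥ PySem.List.len existing)
        && (PySem.List.slice current none (some (PySem.List.len existing)) == existing)) = true
        ↔ (existing.length ≤ current.length ∧ current.take existing.length = existing) := by
      simp only [Bool.and_eq_true, decide_eq_true_iff, beq_iff_eq, PySem.List.len_eq,
        PySem.List.slice_to_natCast, ge_iff_le, Nat.cast_le]
    by_cases hce : current = existing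
    · subst hce
      have hred : pvAInner current acc (current :: rest) =
          if acc.contains current then false else pvAInner current acc rest := by
        simp [pvAInner]
      by_cases hacc : current ∈ acc
      · rw [hred, if_pos (by simpa using hacc)]
        simp only [Bool.false_eq_true, false_iff]
        rintro ⟨h1, -⟩
        exact h1 ⟨by simp, hacc⟩
      · rw [hred, if_neg (by simpa using hacc), ih]
        constructor
        · rintro ⟨h1, h2⟩
          refine ⟨fun h => hacc h.2, ?_⟩
          intro e he hne
          rcases List.mem_cons.mp he with rfl | he'
          · exact absurd rfl hne
          · exact h2 e he' hne
        · rintro ⟨h1, h2⟩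
          exact ⟨fun h => hacc h.2, fun e he hne => h2 e (List.mem_cons_of_mem _ he) hne⟩
    · have hred : pvAInner current acc (existing :: rest) =
          if (decide (PySem.List.len current ≥ PySem.List.len existing)
              && (PySem.List.slice current none (some (PySem.List.len existing)) == existing))
          then false else pvAInner current acc rest := by
        have hne : (current == existing) = false := by
          rw [beq_eq_false_iff_ne]; exact hce
        simp [pvAInner, hne]
      by_cases hpre : existing.length ≤ current.length ∧ current.take existing.length = existing
      · rw [hred, if_pos (hB.mpr hpre)]
        simp only [Bool.false_eq_true, false_iff]
        rintro ⟨-, h2⟩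
        exact (h2 existing (by simp) hce) hpre
      · rw [hred, if_neg (fun h => hpre (hB.mp h)), ih]
        constructor
        · rintro ⟨h1, h2⟩
          refine ⟨fun h => h1 ⟨?_, h.2⟩, ?_⟩
          · rcases List.mem_cons.mp h.1 with h' | h'
            · exact (hce h').elim
            · exact h'
          · intro e he hne
            rcases List.mem_cons.mp he with rfl | he'
            · exact fun hc => hpre hc
            · exact h2 e he' hne
        · rintro ⟨h1, h2⟩
          exact ⟨fun h => h1 ⟨List.mem_cons_of_mem _ h.1, h.2⟩,
            fun e he hne => h2 e (List.mem_cons_of_mem _ he) hne⟩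

-- 'some other element of s is a prefix of c' ↔ 'some proper prefix of c is an element of s'
theorem prefix_exists_iff (c : List Int) (s : List (List Int)) :
    (∃ e ∈ s, c ≠ e ∧ e.length ≤ c.length ∧ c.take e.length = e) ↔
      (∃ k : Nat, k < c.length ∧ c.take k ∈ s) := by
  constructor
  · rintro ⟨e, hes, hne, hle, htake⟩
    refine ⟨e.length, ?_, by rw [htake]; exact hes⟩
    rcases Nat.lt_or_ge e.length c.length with h | h
    · exact h
    · have hlen : e.length = c.length := le_antisymm hle h
      exact absurd (by rw [← htake, hlen, List.take_length] : c = e) hne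
  · rintro ⟨k, hk, hmem⟩
    have hlen : (c.take k).length = k := by
      rw [List.length_take]; omega
    refine ⟨c.take k, hmem, ?_, ?_, ?_⟩
    · intro h
      have := congrArg List.length h
      rw [hlen] at this
      omega
    · rw [hlen]; omega
    · rw [hlen]

-- B's prefix probe computes exactly that proper-prefix membership.
theorem pvBHasPrefix_iff (c : List Int) (s : List (List Int)) :
    pvBHasPrefix c (PySem.Set.ofList s)
        (PySem.Set.ofList (s.map (fun l => PySem.List.len l))) = true ↔
      (∃ k : Nat, k < c.length ∧ c.take k ∈ s) := by
  unfold pvBHasPrefix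
  rw [List.any_eq_true]
  constructor
  · rintro ⟨i, hi, hcond⟩
    rw [Bool.and_eq_true, decide_eq_true_iff] at hcond
    obtain ⟨hlt, hc⟩ := hcond
    obtain ⟨e, he, rfl⟩ := List.mem_map.mp ((PySem.Set.mem_ofList _ _).mp hi)
    rw [PySem.List.len_eq] at hlt hc
    rw [PySem.List.len_eq, Nat.cast_lt] at hlt
    refine ⟨e.length, hlt, ?_⟩
    rw [PySem.List.slice_to_natCast, PySem.Set.contains_iff, PySem.Set.mem_ofList] at hc
    exact hc
  · rintro ⟨k, hk, hmem⟩
    refine ⟨(k : Int), ?_, ?_⟩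
    · rw [PySem.Set.mem_ofList, List.mem_map]
      refine ⟨c.take k, hmem, ?_⟩
      rw [PySem.List.len_eq, List.length_take, min_eq_left hk.le]
    · rw [Bool.and_eq_true, decide_eq_true_iff]
      refine ⟨?_, ?_⟩
      · rw [PySem.List.len_eq, Nat.cast_lt]; exact hk
      · rw [PySem.List.slice_to_natCast, PySem.Set.contains_iff, PySem.Set.mem_ofList]
        exact hmem

-- A's keep test for an element of s equals B's two skip tests combined.
theorem keep_eq (s acc : List (List Int)) (c : List Int) (hc : c ∈ s) :
    pvAInner c acc s =
      (!(PySem.Set.contains (PySem.Set.ofList acc) c)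
        && !(pvBHasPrefix c (PySem.Set.ofList s)
              (PySem.Set.ofList (s.map (fun l => PySem.List.len l))))) := by
  by_cases hacc : c ∈ acc
  · have h1 : pvAInner c acc s = false := by
      rw [← Bool.not_eq_true, pvAInner_iff]; tauto
    simp [h1, PySem.Set.mem_ofList, hacc]
  · by_cases hp : pvBHasPrefix c (PySem.Set.ofList s) (PySem.Set.ofList (s.map (fun l => PySem.List.len l))) = true
    · have h1 : pvAInner c acc s = false := by
        rw [← Bool.not_eq_true, pvAInner_iff]
        rw [pvBHasPrefix_iff] at hp
        rw [← prefix_exists_iff] at hp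
        rcases hp with ⟨e, hes, hne, hrest⟩
        intro hcon
        exact (hcon.2 e hes hne) hrest
      simp only [PySem.List.len_eq] at hp
      simp [h1, hp]
    · have h1 : pvAInner c acc s = true := by
        rw [pvAInner_iff]
        refine ⟨by tauto, ?_⟩
        intro e he hne hcon
        exact hp (by
          rw [pvBHasPrefix_iff, ← prefix_exists_iff]
          exact ⟨e, he, hne, hcon⟩)
      rw [Bool.not_eq_true] at hp
      simp only [PySem.List.len_eq] at hp
      simp [h1, hp, PySem.Set.mem_ofList, hacc]

-- The two folds stay in lock-step: B's seen-set is literally its output list.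
theorem fold_locked (s : List (List Int)) (t : List (List Int)) (ht : ∀ c ∈ t, c ∈ s)
    (acc : List (List Int)) (hnd : acc.Nodup) :
    t.foldl
      (fun (st : PySem.Set (List Int) × List (List Int)) (cur : List Int) =>
        if PySem.Set.contains st.1 cur then st
        else if pvBHasPrefix cur (PySem.Set.ofList s) (PySem.Set.ofList (s.map (fun l => PySem.List.len l))) then st
        else (PySem.Set.add st.1 cur, st.2 ++ [cur]))
      (acc, acc)
    = (t.foldl (fun a current => if pvAInner current a s then a ++ [current] else a) acc,
       t.foldl (fun a current => if pvAInner current a s then a ++ [current] else a) acc) := by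
  induction t generalizing acc with
  | nil => simp
  | cons c rest ih =>
    have hcs : c ∈ s := ht c (by simp)
    have hrest : ∀ x ∈ rest, x ∈ s := fun x hx => ht x (by simp [hx])
    simp only [List.foldl_cons]
    rw [keep_eq s acc c hcs]
    by_cases hacc : c ∈ acc
    · have hc1 : PySem.Set.contains (PySem.Set.ofList acc) c = true := by
        rw [PySem.Set.contains_iff, PySem.Set.mem_ofList]; exact hacc
      have hc2 : PySem.Set.contains (acc, acc).1 c = true := by
        rw [PySem.Set.contains_iff]; exact hacc
      simp only [hc1, hc2, Bool.not_true, Bool.false_and, Bool.false_eq_true, if_false, if_true]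
      exact ih hrest acc hnd
    · have hc1 : PySem.Set.contains (PySem.Set.ofList acc) c = false := by
        rw [← Bool.not_eq_true, PySem.Set.contains_iff, PySem.Set.mem_ofList]; exact hacc
      have hc2 : PySem.Set.contains (acc, acc).1 c = false := by
        rw [← Bool.not_eq_true, PySem.Set.contains_iff]; exact hacc
      simp only [hc1, hc2, Bool.not_false, Bool.true_and, Bool.false_eq_true, if_false]
      by_cases hp : pvBHasPrefix c (PySem.Set.ofList s) (PySem.Set.ofList (s.map (fun l => PySem.List.len l))) = true
      · simp only [hp, Bool.not_true, Bool.false_eq_true, if_false, if_true]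
        exact ih hrest acc hnd
      · rw [Bool.not_eq_true] at hp
        simp only [hp, Bool.not_false, if_true, Bool.false_eq_true, if_false]
        have hadd : PySem.Set.add (acc, acc).1 c = acc ++ [c] :=
          PySem.Set.add_of_not_mem hacc
        rw [hadd]
        exact ih hrest (acc ++ [c]) (by
          rw [List.nodup_append]
          refine ⟨hnd, List.nodup_singleton _, ?_⟩
          intro a ha b hb
          have hb' : b = c := by simpa using hb
          subst hb'
          exact fun h => hacc (h ▸ ha))

-- ===== VERDICT (by name: the statement is the Claim_ definition above) =====
theorem remove_sublists_spec : Claim_equal_remove_sublists := by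
  intro lists _
  unfold Spec_remove_sublists remove_sublists remove_sublists_alt
  simp only []
  rw [show (PySem.Set.empty : PySem.Set (List Int)) = ([] : List (List Int)) from rfl]
  rw [fold_locked (PySem.List.sorted lists (fun l => PySem.List.len l) true)
    (PySem.List.sorted lists (fun l => PySem.List.len l) true) (fun c hc => hc) [] (by simp)]
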